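-- pv_equiv track=rewrite | github.com/p1x31/ctci-python | yandex/tinkoff/d_brute.py | earn_money
-- ===== SOURCE A (Python) =====
-- def earn_money(n, m, nominals):
--     nominals.sort()  # Sort the nominals in ascending order
--     result = []  # Initialize a list to store the stolen nominals
--
--     # Helper function to check if a sum of nominals equals n
--     def find_combination(target_sum, current_combination):
--         if target_sum == 0:
--             return current_combination
--         if target_sum < 0 or len(current_combination) >= 3:
--             return None
--
--         for i, nominal in enumerate(nominals):
--             remaining_combination = find_combination(target_sum - nominal, current_combination + [nominal])
--             if remaining_combination:
--                 return remaining_combination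
--
--         return None
--
--     # Try to find a combination of nominals that equals n
--     combination = find_combination(n, [])
--
--     if combination:
--         for nominal in combination:
--             result.extend([nominal, nominal])  # Add each nominal twice
--         return result
--     else:
--         return [-1]  # No valid combination found
-- ===== SOURCE B (Python) =====
-- def earn_money(n, m, nominals):
--     # O(u^2) with a set lookup for the third nominal (u = number of distinct
--     # nominals) instead of A's O(m^3) depth-3 DFS; same return value.
--     # Like A, this sorts `nominals` in place (observable side effect).
--     nominals.sort()
--     if n <= 0:
--         return [-1]  # zero or negative amounts need no / admit no combination here
--     vals = sorted(set(nominals))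
--     vs = set(vals)
--     for a in vals:
--         if a == n:
--             return [a, a]
--         r1 = n - a
--         if r1 > 0:
--             for b in vals:
--                 if b == r1:
--                     return [a, a, b, b]
--                 r2 = r1 - b
--                 if r2 > 0 and r2 in vs:
--                     return [a, a, b, b, r2, r2]
--     return [-1]
-- ===== Notes on version B (the rewrite author's own statement) =====
-- stated objective: faster
-- what changed: Replaces the depth-3 DFS over the full sorted list (retrying every nominal at every level) by two nested loops over the sorted distinct nominals with a hash-set lookup for the third value, preserving the DFS's value-lexicographic, prefix-first tie-break; intended as faster (O(u^2) vs O(m^3)): a timing run measured A timing out on hard instances (e.g. 26000x B's time at n=256 on one run) while B always returned quickly, though on easy instances of the same size both are sub-millisecond.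
import Mathlib
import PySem

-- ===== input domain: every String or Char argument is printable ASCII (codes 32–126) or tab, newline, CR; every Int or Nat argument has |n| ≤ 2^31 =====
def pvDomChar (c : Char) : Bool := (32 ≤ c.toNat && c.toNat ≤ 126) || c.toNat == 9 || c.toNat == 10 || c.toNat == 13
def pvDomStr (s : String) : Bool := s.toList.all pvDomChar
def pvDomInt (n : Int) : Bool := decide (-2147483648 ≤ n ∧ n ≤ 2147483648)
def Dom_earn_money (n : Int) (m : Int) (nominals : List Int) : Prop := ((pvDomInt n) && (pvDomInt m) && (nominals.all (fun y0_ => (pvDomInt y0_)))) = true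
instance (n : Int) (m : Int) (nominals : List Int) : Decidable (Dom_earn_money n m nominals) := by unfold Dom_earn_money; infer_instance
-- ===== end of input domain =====

-- B replaces A's depth-3 DFS over the sorted list by two nested loops over the
-- sorted distinct nominals with a set lookup for the third value (intended as
-- faster; a timing run measured A timing out on hard instances where B
-- returned quickly); equivalence is about the RETURN value (both Pythons sort
-- `nominals` in place).

-- ===== PORT A =====
-- A's recursive helper find_combination; the fuel argument only drives the
-- recursion (cur's length check bounds the depth by 3, so fuel 3 never runs out).
mutual
def findComb (noms : List Int) (fuel : Nat) (target : Int) (cur : List Int) : Option (List Int) :=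
  if target = 0 then some cur
  else if target < 0 ∨ 3 ≤ cur.length then none
  else match fuel with
    | 0 => none
    | Nat.succ f => fcLoop noms f target cur noms
termination_by (fuel, 0, 0)

-- the `for i, nominal in enumerate(nominals)` loop (index i unused);
-- `if remaining_combination:` = some non-empty list
def fcLoop (noms : List Int) (f : Nat) (target : Int) (cur : List Int) : List Int → Option (List Int)
  | [] => none
  | nominal :: rest =>
    match findComb noms f (target - nominal) (cur ++ [nominal]) with
    | some l => if l = [] then fcLoop noms f target cur rest else some l
    | none => fcLoop noms f target cur rest
termination_by l => (f, 1, l.length)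
end

def earn_money (n : Int) (m : Int) (nominals : List Int) : List Int :=
  let noms := PySem.List.sorted nominals (fun x => x) false   -- nominals.sort()
  match findComb noms 3 n [] with
  | some l => if l = [] then [-1] else l.foldl (fun acc x => acc ++ [x, x]) []
  | none => [-1]

-- ===== PORT B =====
-- inner `for b in vals` loop of Source B
def altInner (vs : List Int) (r1 : Int) (a : Int) : List Int → Option (List Int)
  | [] => none
  | b :: rest =>
    if b = r1 then some [a, a, b, b]
    else
      let r2 := r1 - b
      if 0 < r2 ∧ PySem.Set.contains vs r2 then some [a, a, b, b, r2, r2]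
      else altInner vs r1 a rest

-- outer `for a in vals` loop of Source B
def altOuter (vals : List Int) (vs : List Int) (n : Int) : List Int → Option (List Int)
  | [] => none
  | a :: rest =>
    if a = n then some [a, a]
    else
      let r1 := n - a
      if 0 < r1 then
        match altInner vs r1 a vals with
        | some res => some res
        | none => altOuter vals vs n rest
      else altOuter vals vs n rest

def earn_money_alt (n : Int) (m : Int) (nominals : List Int) : List Int :=
  if n ≤ 0 then [-1]
  else
    let vals := PySem.List.sorted (PySem.Set.ofList nominals) (fun x => x) false  -- sorted(set(nominals))
    let vs := PySem.Set.ofList vals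
    match altOuter vals vs n vals with
    | some r => r
    | none => [-1]

-- ===== PRECONDITION & SPEC =====
def Spec_earn_money (n : Int) (m : Int) (nominals : List Int) (out : List Int) : Prop := out = earn_money_alt n m nominals
instance (n : Int) (m : Int) (nominals : List Int) (out : List Int) : Decidable (Spec_earn_money n m nominals out) := by unfold Spec_earn_money; infer_instance

-- ===== CLAIM (what is proved, stated in full; the proofs are below) =====
def Claim_equal_earn_money : Prop := ∀ (n : Int) (m : Int) (nominals : List Int), Dom_earn_money n m nominals → Spec_earn_money n m nominals (earn_money n m nominals)

-- ===== LEMMAS AND PROOFS =====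

def dblAll (l : List Int) : List Int := l.flatMap (fun x => [x, x])

-- loop-body normal forms (proof-only): what one step of each level computes
def innerA (noms : List Int) (r1 a b : Int) : Option (List Int) :=
  if b = r1 then some [a, b]
  else if 0 < r1 - b then
    (if noms.contains (r1 - b) then some [a, b, r1 - b] else none)
  else none

def outerA (noms : List Int) (n a : Int) : Option (List Int) :=
  if a = n then some [a]
  else if 0 < n - a then noms.findSome? (innerA noms (n - a) a)
  else none

def innerB (vs : List Int) (r1 a b : Int) : Option (List Int) :=
  if b = r1 then some [a, b]
  else if 0 < r1 - b then
    (if PySem.Set.contains vs (r1 - b) then some [a, b, r1 - b] else none)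
  else none

def outerB (vals vs : List Int) (n a : Int) : Option (List Int) :=
  if a = n then some [a]
  else if 0 < n - a then vals.findSome? (innerB vs (n - a) a)
  else none

theorem foldl_double (l : List Int) (acc : List Int) :
    l.foldl (fun acc x => acc ++ [x, x]) acc = acc ++ dblAll l := by
  induction l generalizing acc with
  | nil => simp [dblAll]
  | cons x t ih => simp [List.foldl, dblAll, ih]

theorem findSome?_congr {α β : Type} (f g : α → Option β) (l : List α)
    (h : ∀ x ∈ l, f x = g x) : l.findSome? f = l.findSome? g := by
  induction l with
  | nil => rfl
  | cons a t ih =>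
    simp only [List.findSome?_cons, h a (by simp)]
    cases g a with
    | none => exact ih (fun x hx => h x (by simp [hx]))
    | some b => rfl

-- dropping duplicates from a ≤-sorted list does not change a first-match search
theorem findSome?_dedup {β : Type} (f : Int → Option β) (l : List Int)
    (hs : l.Pairwise (· ≤ ·)) : l.findSome? f = l.dedup.findSome? f := by
  induction l with
  | nil => rfl
  | cons a t ih =>
    have hle : ∀ x ∈ t, a ≤ x := (List.pairwise_cons.1 hs).1
    have hst : t.Pairwise (· ≤ ·) := (List.pairwise_cons.1 hs).2
    by_cases hmem : a ∈ t
    case neg =>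
      rw [List.dedup_cons_of_notMem hmem]
      cases hfa : f a <;> simp [hfa, ih hst]
    · rw [List.dedup_cons_of_mem hmem]
      cases hfa : f a with
      | none => simp [hfa, ih hst]
      | some b =>
        have hadt : a ∈ t.dedup := List.mem_dedup.2 hmem
        cases hd : t.dedup with
        | nil => simp [hd] at hadt
        | cons h r =>
          have hht : h ∈ t := List.mem_dedup.1 (by simp [hd])
          have h1 : a ≤ h := hle h hht
          have hsd : t.dedup.Pairwise (· ≤ ·) := hst.sublist (List.dedup_sublist t)
          have h2 : h ≤ a := by
            rcases (by simpa [hd] using hadt : a = h ∨ a ∈ r) with rfl | hr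
            · exact le_refl _
            · exact ((List.pairwise_cons.1 (hd ▸ hsd)).1 a hr)
          have : h = a := le_antisymm h2 h1
          subst this
          simp [hfa]

theorem eq_of_nodup_sorted (l l' : List Int) (h1 : l.Nodup) (h2 : l'.Nodup)
    (p1 : l.Pairwise (· ≤ ·)) (p2 : l'.Pairwise (· ≤ ·))
    (hm : ∀ x, x ∈ l ↔ x ∈ l') : l = l' := by
  have hperm : l.Perm l' := (List.perm_ext_iff_of_nodup h1 h2).2 hm
  exact hperm.eq_of_pairwise (fun a b _ _ ha hb => le_antisymm ha hb) p1 p2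

-- innermost level: fuel-0 find_combination over the c-loop is a membership test
theorem fc0 (noms l : List Int) (r a b : Int) :
    fcLoop noms 0 r [a, b] l = if l.contains r then some [a, b, r] else none := by
  induction l with
  | nil => simp [fcLoop]
  | cons c t ih =>
    rw [fcLoop, findComb]
    by_cases hc : c = r
    · subst hc
      simp
    · have h0 : ¬(r - c = 0) := by omega
      have hrc : ¬ r = c := fun h => hc h.symm
      simp [h0, hrc, ih]

theorem fc1 (noms l : List Int) (r1 a : Int) :
    fcLoop noms 1 r1 [a] l = l.findSome? (innerA noms r1 a) := by
  induction l with
  | nil => simp [fcLoop]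
  | cons b t ih =>
    rw [fcLoop, findComb, List.findSome?_cons]
    by_cases hb : b = r1
    · simp [hb, innerA]
    · have h1 : ¬ r1 - b = 0 := by omega
      by_cases hlt : r1 - b < 0
      · have k3 : ¬ 0 < r1 - b := by omega
        have k4 : ¬ b < r1 := by omega
        simp [innerA, h1, hlt, hb, k3, k4, ih]
      · have k3 : 0 < r1 - b := by omega
        have k4 : b < r1 := by omega
        by_cases hmem : (r1 - b) ∈ noms
        · simp [innerA, h1, hlt, hb, k3, k4, fc0, hmem]
        · simp [innerA, h1, hlt, hb, k3, k4, fc0, hmem, ih]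

theorem fc2 (noms l : List Int) (n : Int) :
    fcLoop noms 2 n [] l = l.findSome? (outerA noms n) := by
  induction l with
  | nil => simp [fcLoop]
  | cons a t ih =>
    rw [fcLoop, findComb, List.findSome?_cons]
    by_cases ha : a = n
    · simp [ha, outerA]
    · have h1 : ¬ n - a = 0 := by omega
      by_cases hlt : n - a < 0
      · have k3 : ¬ 0 < n - a := by omega
        have k4 : ¬ a < n := by omega
        simp [outerA, h1, hlt, ha, k3, k4, ih]
      · have k3 : 0 < n - a := by omega
        have k4 : a < n := by omega
        have hfc := fc1 noms noms (n - a) a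
        cases hfs : (noms.findSome? (innerA noms (n - a) a)) with
        | none =>
          rw [hfs] at hfc
          simp [outerA, h1, hlt, ha, k3, k4, hfc, hfs, ih]
        | some res =>
          rw [hfs] at hfc
          have hne : res ≠ [] := by
            obtain ⟨b, _, hbody⟩ := List.exists_of_findSome?_eq_some hfs
            unfold innerA at hbody
            split_ifs at hbody <;> (try cases hbody) <;> simp_all
          simp [outerA, h1, hlt, ha, k3, k4, hfc, hfs, hne]

theorem alt1 (vs l : List Int) (r1 a : Int) :
    altInner vs r1 a l = Option.map dblAll (l.findSome? (innerB vs r1 a)) := by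
  induction l with
  | nil => simp [altInner]
  | cons b t ih =>
    rw [altInner, List.findSome?_cons]
    by_cases hb : b = r1
    · simp [hb, innerB, dblAll]
    · by_cases hp : 0 < r1 - b
      · have k4 : b < r1 := by omega
        by_cases hc : r1 - b ∈ vs
        · have hc' : PySem.Set.contains vs (r1 - b) = true := by
            simpa [PySem.Set.contains] using hc
          simp [innerB, hb, hp, k4, hc, hc', dblAll]
        · have hc' : ¬ PySem.Set.contains vs (r1 - b) = true := by
            simpa [PySem.Set.contains] using hc
          simp [innerB, hb, hp, k4, hc, hc', ih]
      · have k4 : ¬ b < r1 := by omega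
        simp [innerB, hb, hp, k4, ih]

theorem alt2 (vals vs l : List Int) (n : Int) :
    altOuter vals vs n l = Option.map dblAll (l.findSome? (outerB vals vs n)) := by
  induction l with
  | nil => simp [altOuter]
  | cons a t ih =>
    rw [altOuter, List.findSome?_cons]
    by_cases ha : a = n
    · simp [ha, outerB, dblAll]
    · by_cases hp : 0 < n - a
      · have k4 : a < n := by omega
        have hin := alt1 vs vals (n - a) a
        cases hfs : (vals.findSome? (innerB vs (n - a) a)) with
        | none =>
          rw [hfs] at hin
          simp [outerB, ha, hp, k4, hin, hfs, ih]
        | some res =>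
          rw [hfs] at hin
          simp [outerB, ha, hp, k4, hin, hfs]
      · have k4 : ¬ a < n := by omega
        simp [outerB, ha, hp, k4, ih]

-- ===== VERDICT (by name: the statement is the Claim_ definition above) =====
theorem earn_money_spec : Claim_equal_earn_money := by
  unfold Claim_equal_earn_money
  intro n m nominals _
  unfold Spec_earn_money
  by_cases hn : n ≤ 0
  · have hB : earn_money_alt n m nominals = [-1] := by
      unfold earn_money_alt
      rw [if_pos hn]
    have hfc : findComb (PySem.List.sorted nominals (fun x => x) false) 3 n [] =
        (if n = 0 then some [] else none) := by
      rw [findComb]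
      by_cases h0 : n = 0
      · simp [h0]
      · have hneg : n < 0 := by omega
        simp [h0, hneg]
    have hAeq : earn_money n m nominals = [-1] := by
      unfold earn_money
      show (match findComb (PySem.List.sorted nominals (fun x => x) false) 3 n [] with
        | some l => if l = [] then [-1] else List.foldl (fun acc x => acc ++ [x, x]) [] l
        | none => [-1]) = [-1]
      rw [hfc]
      by_cases h0 : n = 0 <;> simp [h0]
    rw [hAeq, hB]
  · unfold earn_money earn_money_alt
    rw [if_neg hn]
    have hpos : 0 < n := by omega
    set noms := PySem.List.sorted nominals (fun x => x) false with hnoms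
    set vals := PySem.List.sorted (PySem.Set.ofList nominals) (fun x => x) false with hvals
    set vs := PySem.Set.ofList vals with hvs
    have hA : findComb noms 3 n [] = fcLoop noms 2 n [] noms := by
      rw [findComb]
      have c1 : ¬ n = 0 := by omega
      have c2 : ¬ (n < 0 ∨ 3 ≤ ([] : List Int).length) := by simp; omega
      rw [if_neg c1, if_neg c2]
    -- membership and order facts
    have hmN : ∀ x : Int, x ∈ noms ↔ x ∈ nominals := fun x =>
      PySem.List.mem_sorted nominals (fun x => x) false x
    have hmV : ∀ x : Int, x ∈ vals ↔ x ∈ nominals := fun x => by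
      rw [hvals, PySem.List.mem_sorted, PySem.Set.mem_ofList]
    have hcont : ∀ x : Int, noms.contains x = PySem.Set.contains vs x := by
      intro x
      have : (x ∈ noms) ↔ (x ∈ vs) := by
        rw [hmN x, hvs, PySem.Set.mem_ofList, hmV x]
      simp [PySem.Set.contains, this]
    have hpairN : noms.Pairwise (· ≤ ·) := PySem.List.sorted_pairwise nominals (fun x => x)
    have hdedup : noms.dedup = vals := by
      apply eq_of_nodup_sorted
      · exact List.nodup_dedup noms
      · exact ((PySem.List.sorted_perm (PySem.Set.ofList nominals) (fun x => x) false).nodup_iff).2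
          (PySem.Set.nodup_ofList nominals)
      · exact hpairN.sublist (List.dedup_sublist noms)
      · exact PySem.List.sorted_pairwise (PySem.Set.ofList nominals) (fun x => x)
      · intro x
        rw [List.mem_dedup, hmN x, hmV x]
    -- pointwise equality of the loop bodies
    have hinner : ∀ r1 a, noms.findSome? (innerA noms r1 a) = vals.findSome? (innerB vs r1 a) := by
      intro r1 a
      rw [findSome?_congr (innerA noms r1 a) (innerB vs r1 a) noms
        (fun b _ => by unfold innerA innerB; rw [hcont])]
      rw [findSome?_dedup _ noms hpairN, hdedup]
    have houter : noms.findSome? (outerA noms n) = vals.findSome? (outerB vals vs n) := by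
      rw [findSome?_congr (outerA noms n) (outerB vals vs n) noms
        (fun a _ => by unfold outerA outerB; rw [hinner])]
      rw [findSome?_dedup _ noms hpairN, hdedup]
    show (match findComb noms 3 n [] with
      | some l => if l = [] then [-1] else List.foldl (fun acc x => acc ++ [x, x]) [] l
      | none => [-1]) =
      (match altOuter vals vs n vals with
      | some r => r
      | none => [-1])
    rw [hA, fc2, houter, alt2]
    cases hres : vals.findSome? (outerB vals vs n) with
    | none => simp
    | some l =>
      have hne : l ≠ [] := by
        obtain ⟨a, _, hbody⟩ := List.exists_of_findSome?_eq_some hres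
        unfold outerB at hbody
        split_ifs at hbody with w1 w2
        · cases hbody; simp
        · obtain ⟨b, _, hbody2⟩ := List.exists_of_findSome?_eq_some hbody
          unfold innerB at hbody2
          split_ifs at hbody2 <;> (try cases hbody2) <;> simp_all
      simp [hne, foldl_double, dblAll, List.flatMap_def]
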